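-- pv_equiv track=rewrite | github.com/huggin/gfg | two_pointers/maximum_possible_sum.py | returnMaxSum
-- ===== SOURCE A (Python) =====
-- from collections import defaultdict
--
-- def returnMaxSum(a, b, n):
--     # Your code goes here
--     ans = 0
--     curr = 0
--     d = defaultdict(int)
--     j = 0
--     for i in range(n):
--         while j < i and d[a[i]] > 0:
--             curr -= b[j]
--             d[a[j]] -= 1
--             j += 1
--         curr += b[i]
--         d[a[i]] = 1
--
--         ans = max(ans, curr)
--     return ans
-- ===== SOURCE B (Python) =====
-- def returnMaxSum(a, b, n):
--     # prefix sums of b plus a last-occurrence index map; no inner while loop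
--     pref = [0]
--     for k in range(n):
--         pref.append(pref[-1] + b[k])
--     ans = 0
--     last = {}
--     start = 0
--     for i in range(n):
--         if a[i] in last and last[a[i]] >= start:
--             start = last[a[i]] + 1
--         last[a[i]] = i
--         ans = max(ans, pref[i + 1] - pref[start])
--     return ans
-- ===== Notes on version B (the rewrite author's own statement) =====
-- stated objective: alternative
-- what changed: Replaces the shrinking-window inner while-loop with running sum and occurrence-count dict by a one-pass last-seen-index map over a precomputed prefix-sum array of b.
import Mathlib
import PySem

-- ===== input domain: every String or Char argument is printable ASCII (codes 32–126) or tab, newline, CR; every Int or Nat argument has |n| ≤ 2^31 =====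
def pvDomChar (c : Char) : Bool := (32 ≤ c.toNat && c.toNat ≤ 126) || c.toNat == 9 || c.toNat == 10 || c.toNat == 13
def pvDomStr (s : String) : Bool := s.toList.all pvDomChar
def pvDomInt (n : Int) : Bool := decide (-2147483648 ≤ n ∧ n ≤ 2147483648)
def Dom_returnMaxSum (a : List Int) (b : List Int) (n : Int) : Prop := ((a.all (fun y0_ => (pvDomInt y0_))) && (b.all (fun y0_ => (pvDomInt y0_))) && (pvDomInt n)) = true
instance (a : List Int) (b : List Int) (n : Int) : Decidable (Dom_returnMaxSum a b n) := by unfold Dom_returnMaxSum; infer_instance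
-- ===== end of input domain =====

-- B replaces A's shrinking-window inner while-loop (running sum + count dict) by a
-- last-seen-index map over a precomputed prefix-sum array of b; same return value on Pre_.

-- ===== PORT A =====
-- the inner `while j < i and d[a[i]] > 0` loop; fuel (i - j).toNat merely makes it total
def returnMaxSumShrink (a b : List Int) (ai i : Int) :
    Nat → Int × PySem.Dict Int Int × Int → Int × PySem.Dict Int Int × Int
  | 0, s => s
  | fuel+1, (curr, d, j) =>
    if j < i ∧ 0 < d.getD ai 0 then
      returnMaxSumShrink a b ai i fuel
        (curr - PySem.List.pyGetD b j 0, d.modify (PySem.List.pyGetD a j 0) 0 (· - 1), j + 1)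
    else (curr, d, j)

def stepA (a b : List Int) (st : Int × Int × PySem.Dict Int Int × Int) (i : Int) :
    Int × Int × PySem.Dict Int Int × Int :=
  match returnMaxSumShrink a b (PySem.List.pyGetD a i 0) i (i - st.2.2.2).toNat
      (st.2.1, st.2.2.1, st.2.2.2) with
  | (curr0, d0, j0) =>
    let curr1 := curr0 + PySem.List.pyGetD b i 0
    let d1 := d0.insert (PySem.List.pyGetD a i 0) 1
    (max st.1 curr1, curr1, d1, j0)

def returnMaxSum (a : List Int) (b : List Int) (n : Int) : Int :=
  ((PySem.List.pyRange 0 n 1).foldl (stepA a b)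
    ((0:Int), (0:Int), (PySem.Dict.empty : PySem.Dict Int Int), (0:Int))).1

-- ===== PORT B =====
def stepB (a pref : List Int) (st : Int × PySem.Dict Int Int × Int) (i : Int) :
    Int × PySem.Dict Int Int × Int :=
  let ai := PySem.List.pyGetD a i 0
  let start1 := match st.2.1.get? ai with
    | some k => if st.2.2 ≤ k then k + 1 else st.2.2
    | none => st.2.2
  (max st.1 (PySem.List.pyGetD pref (i+1) 0 - PySem.List.pyGetD pref start1 0),
   st.2.1.insert ai i, start1)

def returnMaxSum_alt (a : List Int) (b : List Int) (n : Int) : Int :=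
  let pref := (PySem.List.pyRange 0 n 1).foldl
    (fun pref k => pref ++ [PySem.List.pyGetD pref (-1) 0 + PySem.List.pyGetD b k 0]) [(0:Int)]
  ((PySem.List.pyRange 0 n 1).foldl (stepB a pref)
    ((0:Int), (PySem.Dict.empty : PySem.Dict Int Int), (0:Int))).1

-- ===== PRECONDITION & SPEC =====
-- Pre_ excludes exactly the inputs where A raises IndexError: indices 0..n-1 must exist in a and b.
def Pre_returnMaxSum (a : List Int) (b : List Int) (n : Int) : Prop :=
  n ≤ (a.length : Int) ∧ n ≤ (b.length : Int)
instance (a : List Int) (b : List Int) (n : Int) : Decidable (Pre_returnMaxSum a b n) := by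
  unfold Pre_returnMaxSum; infer_instance

def pvWitness_returnMaxSum : List Int × List Int × Int := ([1, 2, 1], [3, -1, 4], 3)

def Spec_returnMaxSum (a : List Int) (b : List Int) (n : Int) (out : Int) : Prop := out = returnMaxSum_alt a b n
instance (a : List Int) (b : List Int) (n : Int) (out : Int) : Decidable (Spec_returnMaxSum a b n out) := by unfold Spec_returnMaxSum; infer_instance

-- ===== CLAIM (what is proved, stated in full; the proofs are below) =====
def Claim_equal_returnMaxSum : Prop := ∀ (a : List Int) (b : List Int) (n : Int), Dom_returnMaxSum a b n → Pre_returnMaxSum a b n → Spec_returnMaxSum a b n (returnMaxSum a b n)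

-- ===== LEMMAS AND PROOFS =====

-- the window a[j:m] and the sum of b[j:m]
def pvWin (a : List Int) (j m : Nat) : List Int := (a.take m).drop j
def pvS (b : List Int) (j m : Nat) : Int := (pvWin b j m).sum

-- invariant of B's `last` dict after processing indices 0..m-1
def LastInv (a : List Int) (m : Nat) (last : PySem.Dict Int Int) : Prop :=
  ∀ x : Int,
    (∀ v, last.get? x = some v →
      ∃ k : Nat, v = (k : Int) ∧ k < m ∧ a.getD k 0 = x ∧
        ∀ t, k < t → t < m → a.getD t 0 ≠ x) ∧
    (last.get? x = none → ∀ t, t < m → a.getD t 0 ≠ x)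

lemma pvWin_length (a : List Int) (j m : Nat) (hm : m ≤ a.length) :
    (pvWin a j m).length = m - j := by
  unfold pvWin
  simp [List.length_take, Nat.min_eq_left hm]

lemma pvWin_getElem (a : List Int) (j m p : Nat) (hm : m ≤ a.length) (hp : p < m - j) :
    (pvWin a j m)[p]'(by rw [pvWin_length a j m hm]; exact hp) = a.getD (j + p) 0 := by
  unfold pvWin
  rw [List.getElem_drop, List.getElem_take, List.getD_eq_getElem a 0 (by omega)]

lemma mem_pvWin_iff (a : List Int) (j m : Nat) (hm : m ≤ a.length) (x : Int) :
    x ∈ pvWin a j m ↔ ∃ t, j ≤ t ∧ t < m ∧ a.getD t 0 = x := by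
  rw [List.mem_iff_getElem]
  constructor
  · rintro ⟨p, hp, he⟩
    rw [pvWin_length a j m hm] at hp
    exact ⟨j + p, by omega, by omega, by rw [← pvWin_getElem a j m p hm hp]; exact he⟩
  · rintro ⟨t, h1, h2, h3⟩
    refine ⟨t - j, by rw [pvWin_length a j m hm]; omega, ?_⟩
    rw [pvWin_getElem a j m (t - j) hm (by omega), show j + (t - j) = t by omega]
    exact h3

lemma pvWin_cons (a : List Int) (j m : Nat) (hj : j < m) (hm : m ≤ a.length) :
    pvWin a j m = a.getD j 0 :: pvWin a (j+1) m := by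
  unfold pvWin
  have hl : j < (a.take m).length := by simp [List.length_take]; omega
  rw [List.drop_eq_getElem_cons hl, List.getElem_take, List.getD_eq_getElem a 0 (by omega)]

lemma pvWin_snoc (a : List Int) (j m : Nat) (hj : j ≤ m) (hm : m < a.length) :
    pvWin a j (m+1) = pvWin a j m ++ [a.getD m 0] := by
  unfold pvWin
  have h1 : a.take (m+1) = a.take m ++ [a[m]] := by
    rw [List.take_add_one, List.getElem?_eq_getElem hm]
    rfl
  rw [h1, List.drop_append_of_le_length (by simp [List.length_take]; omega),
    List.getD_eq_getElem a 0 hm]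

lemma pvWin_sum_sub (b : List Int) (j m : Nat) (hj : j ≤ m) :
    pvS b j m = (b.take m).sum - (b.take j).sum := by
  unfold pvS pvWin
  have h2 : (b.take m).take j = b.take j := by rw [List.take_take]; congr 1; omega
  have h1 := congrArg List.sum (List.take_append_drop j (b.take m))
  rw [List.sum_append, h2] at h1
  linarith

lemma pvS_snoc (b : List Int) (j m : Nat) (hj : j ≤ m) (hm : m < b.length) :
    pvS b j m + b.getD m 0 = pvS b j (m+1) := by
  unfold pvS
  rw [pvWin_snoc b j m hj hm]
  simp

lemma win_nodup_unique (a : List Int) (j m : Nat) (hm : m ≤ a.length)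
    (hnd : (pvWin a j m).Nodup) (s t : Nat) (hs1 : j ≤ s) (hs2 : s < m)
    (ht1 : j ≤ t) (ht2 : t < m) (he : a.getD s 0 = a.getD t 0) : s = t := by
  have e1 := pvWin_getElem a j m (s - j) hm (by omega)
  have e2 := pvWin_getElem a j m (t - j) hm (by omega)
  rw [show j + (s - j) = s by omega] at e1
  rw [show j + (t - j) = t by omega] at e2
  have := (List.Nodup.getElem_inj_iff hnd).mp (e1.trans (he.trans e2.symm))
  omega

-- Python xs[-1] on a list ending in y
lemma pyGetD_neg_one (xs : List Int) (y d : Int) :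
    PySem.List.pyGetD (xs ++ [y]) (-1) d = y := by
  have h1 : PySem.List.pyIdx? (xs.length + 1) (-1) = some xs.length := by
    unfold PySem.List.pyIdx?
    rw [if_neg (by omega), if_pos (by push_cast; omega)]
    simp
  simp [PySem.List.pyGetD, PySem.List.pyGet?, h1]

lemma lastInv_insert (a : List Int) (m : Nat) (last : PySem.Dict Int Int)
    (h : LastInv a m last) :
    LastInv a (m+1) (last.insert (a.getD m 0) (m : Int)) := by
  intro x
  by_cases hx : x = a.getD m 0
  · subst hx
    constructor
    · intro v hv
      rw [PySem.Dict.get?_insert, if_pos rfl] at hv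
      refine ⟨m, by injection hv with h2; exact h2.symm, by omega, rfl, ?_⟩
      intro t ht1 ht2
      omega
    · intro hv
      rw [PySem.Dict.get?_insert, if_pos rfl] at hv
      simp at hv
  · constructor
    · intro v hv
      rw [PySem.Dict.get?_insert, if_neg hx] at hv
      obtain ⟨k, rfl, hkm, hak, hmax⟩ := (h x).1 v hv
      refine ⟨k, rfl, by omega, hak, ?_⟩
      intro t ht1 ht2
      by_cases htm : t = m
      · subst htm; exact fun he => hx he.symm
      · exact hmax t ht1 (by omega)
    · intro hv t ht
      rw [PySem.Dict.get?_insert, if_neg hx] at hv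
      by_cases htm : t = m
      · subst htm; exact fun he => hx he.symm
      · exact (h x).2 hv t (by omega)

lemma dInv_insert (d : PySem.Dict Int Int) (w : List Int) (amv : Int)
    (hd : ∀ x, d.getD x 0 = if x ∈ w then 1 else 0) (hnm : amv ∉ w) :
    ∀ x, (d.insert amv 1).getD x 0 = if x ∈ w ++ [amv] then 1 else 0 := by
  intro x
  rw [PySem.Dict.getD_insert]
  by_cases hx : x = amv
  · subst hx; simp
  · rw [if_neg hx, hd]
    simp [hx]

-- shrink is a no-op when the loop condition is false
lemma shrink_noop (a b : List Int) (ai i : Int) (fuel : Nat) (curr : Int)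
    (d : PySem.Dict Int Int) (j : Int) (h : ¬ (j < i ∧ 0 < d.getD ai 0)) :
    returnMaxSumShrink a b ai i fuel (curr, d, j) = (curr, d, j) := by
  cases fuel <;> simp [returnMaxSumShrink, h]

-- one iteration of the shrink loop when the condition holds
lemma shrink_step (a b : List Int) (ai i : Int) (fuel : Nat) (curr : Int)
    (d : PySem.Dict Int Int) (j : Int) (h : j < i ∧ 0 < d.getD ai 0) :
    returnMaxSumShrink a b ai i (fuel+1) (curr, d, j)
      = returnMaxSumShrink a b ai i fuel
          (curr - PySem.List.pyGetD b j 0,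
           d.modify (PySem.List.pyGetD a j 0) 0 (· - 1), j + 1) := by
  simp [returnMaxSumShrink, h]

-- the shrink loop stops exactly after the (unique) in-window occurrence of a[m]
lemma shrink_run (a b : List Int) (m : Nat) (hma : m ≤ a.length) (hmb : m ≤ b.length)
    (k : Nat) (hk : k < m) (hak : a.getD k 0 = PySem.List.pyGetD a (m : Int) 0)
    (hmax : ∀ t, k < t → t < m → a.getD t 0 ≠ a.getD k 0) :
    ∀ fuel j, j ≤ k + 1 → m - j ≤ fuel →
      ∀ curr d, curr = pvS b j m →
      (∀ x, d.getD x 0 = if x ∈ pvWin a j m then 1 else 0) →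
      (pvWin a j m).Nodup →
      ∃ d', returnMaxSumShrink a b (PySem.List.pyGetD a (m : Int) 0) (m : Int) fuel
          (curr, d, (j : Int)) = (pvS b (k+1) m, d', ((k+1 : Nat) : Int)) ∧
        (∀ x, d'.getD x 0 = if x ∈ pvWin a (k+1) m then 1 else 0) := by
  intro fuel
  induction fuel with
  | zero =>
    intro j hj hf curr d hcurr hd hnd
    have hj' : j = k + 1 := by omega
    subst hj'
    exact ⟨d, by simp [returnMaxSumShrink, hcurr], hd⟩
  | succ fuel ih =>
    intro j hj hf curr d hcurr hd hnd
    by_cases hjk : j = k + 1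
    · subst hjk
      have hnm : PySem.List.pyGetD a (↑m) 0 ∉ pvWin a (k+1) m := by
        rw [mem_pvWin_iff a _ _ hma]
        rintro ⟨t, h1, h2, h3⟩
        exact hmax t (by omega) h2 (h3.trans hak.symm)
      have hgd : d.getD (PySem.List.pyGetD a (↑m) 0) 0 = 0 := by rw [hd, if_neg hnm]
      refine ⟨d, ?_, hd⟩
      rw [shrink_noop a b _ _ _ _ _ _ (by intro hc; rw [hgd] at hc; exact lt_irrefl 0 hc.2), hcurr]
    · have hjk' : j ≤ k := by omega
      have hjm : j < m := by omega
      have hmem : PySem.List.pyGetD a (↑m) 0 ∈ pvWin a j m := by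
        rw [mem_pvWin_iff a _ _ hma]
        exact ⟨k, hjk', hk, hak⟩
      have hcond : ((j : Int) < (m : Int) ∧ 0 < d.getD (PySem.List.pyGetD a ↑m 0) 0) := by
        refine ⟨by exact_mod_cast hjm, ?_⟩
        rw [hd, if_pos hmem]
        norm_num
      have hcons := pvWin_cons a j m hjm hma
      have hconsb := pvWin_cons b j m hjm hmb
      have hcurr' : curr - PySem.List.pyGetD b (j : Int) 0 = pvS b (j+1) m := by
        rw [hcurr, PySem.List.pyGetD_natCast]
        unfold pvS
        rw [hconsb]
        simp
      have hdj : a.getD j 0 ∈ pvWin a j m := by rw [hcons]; exact List.mem_cons_self ..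
      have hnt : a.getD j 0 ∉ pvWin a (j+1) m := by
        rw [hcons] at hnd; exact (List.nodup_cons.mp hnd).1
      have hd' : ∀ x, (d.modify (PySem.List.pyGetD a (j : Int) 0) 0 (· - 1)).getD x 0
          = if x ∈ pvWin a (j+1) m then 1 else 0 := by
        intro x
        rw [PySem.List.pyGetD_natCast, PySem.Dict.getD_modify]
        by_cases hx : x = a.getD j 0
        · subst hx
          rw [if_pos rfl, hd, if_pos hdj, if_neg hnt]
          norm_num
        · rw [if_neg hx, hd]
          have hiff : (x ∈ pvWin a j m) ↔ (x ∈ pvWin a (j+1) m) := by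
            rw [hcons, List.mem_cons]
            exact ⟨fun h => h.resolve_left hx, Or.inr⟩
          simp only [hiff]
      have hnd' : (pvWin a (j+1) m).Nodup := by
        rw [hcons] at hnd; exact (List.nodup_cons.mp hnd).2
      obtain ⟨d', hres, hd''⟩ := ih (j+1) (by omega) (by omega) _ _ rfl hd' hnd'
      refine ⟨d', ?_, hd''⟩
      rw [shrink_step a b _ _ fuel curr d (j : Int) hcond, hcurr',
        show ((j : Int) + 1) = ((j+1 : Nat) : Int) by push_cast; ring]
      exact hres

-- B's prefix-sum loop builds the prefix sums of b
lemma pref_eq (b : List Int) (N : Nat) (hN : N ≤ b.length) :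
    (List.range N).foldl
      (fun (pref : List Int) (k : Nat) =>
        pref ++ [PySem.List.pyGetD pref (-1) 0 + PySem.List.pyGetD b (k : Int) 0]) [(0:Int)]
    = (List.range (N+1)).map (fun (t : Nat) => (b.take t).sum) := by
  induction N with
  | zero => simp
  | succ N ih =>
    rw [List.range_succ, List.foldl_append, ih (by omega)]
    simp only [List.foldl_cons, List.foldl_nil]
    have hP : (List.range (N+1)).map (fun (t : Nat) => (b.take t).sum)
        = (List.range N).map (fun (t : Nat) => (b.take t).sum) ++ [(b.take N).sum] := by
      rw [List.range_succ, List.map_append]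
      rfl
    rw [hP, pyGetD_neg_one, PySem.List.pyGetD_natCast]
    rw [show List.range (N+1+1) = List.range (N+1) ++ [N+1] from List.range_succ,
      List.map_append, hP]
    have hsum : (b.take N).sum + b.getD N 0 = (b.take (N+1)).sum := by
      rw [List.take_add_one, List.getElem?_eq_getElem (show N < b.length by omega),
        List.getD_eq_getElem b 0 (show N < b.length by omega), Option.toList_some,
        List.sum_append, List.sum_cons, List.sum_nil, add_zero]
    simp only [List.append_assoc]
    congr 2
    simp only [List.map_cons, List.map_nil]
    rw [hsum]

-- one joint step, given the shrink result and B's computed new start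
lemma step_both (a b pref : List Int) (N m : Nat) (hmN : m < N)
    (hNa : N ≤ a.length) (hNb : N ≤ b.length)
    (hpref : pref = (List.range (N+1)).map (fun (t : Nat) => (b.take t).sum))
    (ans curr : Int) (d d' last : PySem.Dict Int Int) (jn s' : Nat)
    (hshr : returnMaxSumShrink a b (PySem.List.pyGetD a (m : Int) 0) (m : Int)
        (((m : Int) - (jn : Int)).toNat) (curr, d, (jn : Int))
      = (pvS b s' m, d', ((s' : Nat) : Int)))
    (hd' : ∀ x, d'.getD x 0 = if x ∈ pvWin a s' m then 1 else 0)
    (hnd' : (pvWin a s' m).Nodup)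
    (hnm : a.getD m 0 ∉ pvWin a s' m)
    (hs'm : s' ≤ m)
    (hBstart : (match last.get? (PySem.List.pyGetD a (m : Int) 0) with
        | some v => if (jn : Int) ≤ v then v + 1 else (jn : Int)
        | none => (jn : Int)) = ((s' : Nat) : Int))
    (hlast : LastInv a m last) :
    stepA a b (ans, curr, d, (jn : Int)) (m : Int)
        = (max ans (pvS b s' (m+1)), pvS b s' (m+1),
           d'.insert (a.getD m 0) 1, ((s' : Nat) : Int)) ∧
    stepB a pref (ans, last, (jn : Int)) (m : Int)
        = (max ans (pvS b s' (m+1)), last.insert (a.getD m 0) ((m : Nat) : Int),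
           ((s' : Nat) : Int)) ∧
    (∀ x, (d'.insert (a.getD m 0) 1).getD x 0 = if x ∈ pvWin a s' (m+1) then 1 else 0) ∧
    (pvWin a s' (m+1)).Nodup ∧
    LastInv a (m+1) (last.insert (a.getD m 0) ((m : Nat) : Int)) := by
  have hpy : PySem.List.pyGetD a ((m : Nat) : Int) 0 = a.getD m 0 := PySem.List.pyGetD_natCast a m 0
  have hsumS : pvS b s' m + b.getD m 0 = pvS b s' (m + 1) := pvS_snoc b s' m hs'm (by omega)
  have hsnoc := pvWin_snoc a s' m hs'm (by omega)
  refine ⟨?_, ?_, ?_, ?_, ?_⟩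
  · unfold stepA
    rw [hshr]
    rw [show pvS b s' (m+1) = pvS b s' m + b.getD m 0 from hsumS.symm, ← hpy,
      ← PySem.List.pyGetD_natCast b m 0]
  · have h1 : ((m : Nat) : Int) + 1 = ((m + 1 : Nat) : Int) := by push_cast; ring
    have hget : ∀ (t : Nat), t < N + 1 →
        PySem.List.pyGetD pref ((t : Nat) : Int) 0 = (b.take t).sum := by
      intro t ht
      rw [hpref, PySem.List.pyGetD_natCast, PySem.List.getD_map_range _ _ _ _ ht]
    have hstepB : stepB a pref (ans, last, (jn : Int)) ((m : Nat) : Int)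
        = (max ans (PySem.List.pyGetD pref (((m : Nat) : Int) + 1) 0
            - PySem.List.pyGetD pref (match last.get? (PySem.List.pyGetD a ((m : Nat) : Int) 0) with
                | some v => if ((jn : Nat) : Int) ≤ v then v + 1 else ((jn : Nat) : Int)
                | none => ((jn : Nat) : Int)) 0),
           last.insert (PySem.List.pyGetD a ((m : Nat) : Int) 0) ((m : Nat) : Int),
           (match last.get? (PySem.List.pyGetD a ((m : Nat) : Int) 0) with
                | some v => if ((jn : Nat) : Int) ≤ v then v + 1 else ((jn : Nat) : Int)
                | none => ((jn : Nat) : Int))) := rfl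
    rw [hstepB, hBstart, h1, hget (m+1) (by omega), hget s' (by omega), hpy]
    rw [show (b.take (m+1)).sum - (b.take s').sum = pvS b s' (m+1) from
      (pvWin_sum_sub b s' (m+1) (by omega)).symm]
  · intro x
    rw [hsnoc]
    exact dInv_insert d' (pvWin a s' m) (a.getD m 0) hd' hnm x
  · rw [hsnoc, List.nodup_append]
    refine ⟨hnd', List.nodup_singleton _, ?_⟩
    intro x hx y hy
    rw [List.mem_singleton] at hy
    subst hy
    exact fun he => hnm (he ▸ hx)
  · exact lastInv_insert a m last hlast

-- the joint loop invariant, by induction on the number of processed indices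
lemma loop_inv (a b : List Int) (N : Nat) (hA : N ≤ a.length) (hB : N ≤ b.length)
    (pref : List Int) (hpref : pref = (List.range (N+1)).map (fun (t : Nat) => (b.take t).sum)) :
    ∀ m, m ≤ N →
    ∃ (ans curr : Int) (d last : PySem.Dict Int Int) (jn : Nat),
      (List.range m).foldl (fun st (kk : Nat) => stepA a b st (kk : Int))
          ((0:Int), (0:Int), (PySem.Dict.empty : PySem.Dict Int Int), (0:Int))
        = (ans, curr, d, (jn : Int)) ∧
      (List.range m).foldl (fun st (kk : Nat) => stepB a pref st (kk : Int))
          ((0:Int), (PySem.Dict.empty : PySem.Dict Int Int), (0:Int))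
        = (ans, last, (jn : Int)) ∧
      jn ≤ m ∧ curr = pvS b jn m ∧
      (∀ x, d.getD x 0 = if x ∈ pvWin a jn m then 1 else 0) ∧
      (pvWin a jn m).Nodup ∧ LastInv a m last := by
  intro m
  induction m with
  | zero =>
    intro _
    refine ⟨0, 0, PySem.Dict.empty, PySem.Dict.empty, 0, rfl, rfl, le_refl _,
      by simp [pvS, pvWin], fun x => by simp [PySem.Dict.getD_empty, pvWin],
      by simp [pvWin], fun x => ⟨?_, ?_⟩⟩
    · intro v hv; rw [PySem.Dict.get?_empty] at hv; cases hv
    · intro _ t ht; omega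
  | succ m ih =>
    intro hm1
    obtain ⟨ans, curr, d, last, jn, hAf, hBf, hjm, hcurr, hd, hnd, hlast⟩ := ih (by omega)
    rw [List.range_succ, List.foldl_append, List.foldl_append, hAf, hBf]
    simp only [List.foldl_cons, List.foldl_nil]
    have hpy : PySem.List.pyGetD a ((m : Nat) : Int) 0 = a.getD m 0 :=
      PySem.List.pyGetD_natCast a m 0
    have hfuel : (((m : Nat) : Int) - ((jn : Nat) : Int)).toNat = m - jn := by omega
    by_cases hmem : a.getD m 0 ∈ pvWin a jn m
    · obtain ⟨k, hjk, hkm, hak⟩ := (mem_pvWin_iff a jn m (by omega) _).mp hmem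
      have hmax : ∀ t, k < t → t < m → a.getD t 0 ≠ a.getD k 0 := by
        intro t ht1 ht2 he
        have := win_nodup_unique a jn m (by omega) hnd t k (by omega) ht2 hjk hkm he
        omega
      obtain ⟨d', hres, hd'⟩ := shrink_run a b m (by omega) (by omega) k hkm
        (by rw [hpy, hak]) hmax (m - jn) jn (by omega) (le_refl _) curr d hcurr hd hnd
      have hnm : a.getD m 0 ∉ pvWin a (k+1) m := by
        rw [mem_pvWin_iff a _ _ (by omega)]
        rintro ⟨t, h1, h2, h3⟩
        exact hmax t (by omega) h2 (h3.trans hak.symm)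
      have hsub : pvWin a (k+1) m = (pvWin a jn m).drop (k+1-jn) := by
        unfold pvWin
        rw [List.drop_drop]
        congr 1
        omega
      have hnd2 : (pvWin a (k+1) m).Nodup := by
        rw [hsub]; exact (List.drop_sublist _ _).nodup hnd
      have hsome : last.get? (a.getD m 0) = some ((k : Nat) : Int) := by
        cases hv : last.get? (a.getD m 0) with
        | none => exact absurd hak ((hlast _).2 hv k hkm)
        | some v =>
          obtain ⟨kn, rfl, hknm, hakn, hmax'⟩ := (hlast _).1 v hv
          have hknk : kn = k := by
            rcases lt_trichotomy kn k with h | h | h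
            · exact absurd hak (hmax' k h hkm)
            · exact h
            · exact absurd hakn (fun he => hmax kn h hknm (he.trans hak.symm))
          rw [hknk]
      have hBstart : (match last.get? (PySem.List.pyGetD a ((m : Nat) : Int) 0) with
          | some v => if ((jn : Nat) : Int) ≤ v then v + 1 else ((jn : Nat) : Int)
          | none => ((jn : Nat) : Int)) = (((k+1 : Nat)) : Int) := by
        rw [hpy, hsome]
        show (if ((jn : Nat) : Int) ≤ ((k : Nat) : Int) then ((k : Nat) : Int) + 1
          else ((jn : Nat) : Int)) = (((k+1 : Nat)) : Int)
        rw [if_pos (by exact_mod_cast hjk)]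
        push_cast
        ring
      have hshr : returnMaxSumShrink a b (PySem.List.pyGetD a ((m : Nat) : Int) 0)
          ((m : Nat) : Int) ((((m : Nat) : Int) - ((jn : Nat) : Int)).toNat)
          (curr, d, ((jn : Nat) : Int)) = (pvS b (k+1) m, d', (((k+1 : Nat)) : Int)) := by
        rw [hfuel]
        exact hres
      obtain ⟨hA1, hB1, hd3, hnd3, hlast3⟩ := step_both a b pref N m (by omega) hA hB hpref
        ans curr d d' last jn (k+1) hshr hd' hnd2 hnm (by omega) hBstart hlast
      exact ⟨_, _, _, _, k+1, hA1, hB1, by omega, rfl, hd3, hnd3, hlast3⟩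
    · have hz : d.getD (a.getD m 0) 0 = 0 := by rw [hd, if_neg hmem]
      have hshr : returnMaxSumShrink a b (PySem.List.pyGetD a ((m : Nat) : Int) 0)
          ((m : Nat) : Int) ((((m : Nat) : Int) - ((jn : Nat) : Int)).toNat)
          (curr, d, ((jn : Nat) : Int)) = (pvS b jn m, d, ((jn : Nat) : Int)) := by
        rw [shrink_noop a b _ _ _ _ _ _
          (by intro hc; rw [hpy] at hc; rw [hz] at hc; exact lt_irrefl 0 hc.2), hcurr]
      have hBstart : (match last.get? (PySem.List.pyGetD a ((m : Nat) : Int) 0) with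
          | some v => if ((jn : Nat) : Int) ≤ v then v + 1 else ((jn : Nat) : Int)
          | none => ((jn : Nat) : Int)) = ((jn : Nat) : Int) := by
        rw [hpy]
        rcases hv : last.get? (a.getD m 0) with _ | v
        · rfl
        · obtain ⟨kn, rfl, hknm, hakn, _⟩ := (hlast _).1 v hv
          have hknj : kn < jn := by
            by_contra h
            exact hmem ((mem_pvWin_iff a jn m (by omega) _).mpr ⟨kn, by omega, hknm, hakn⟩)
          have hne : ¬ ((jn : Nat) : Int) ≤ ((kn : Nat) : Int) := by omega
          show (if ((jn : Nat) : Int) ≤ ((kn : Nat) : Int) then ((kn : Nat) : Int) + 1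
            else ((jn : Nat) : Int)) = ((jn : Nat) : Int)
          rw [if_neg hne]
      obtain ⟨hA1, hB1, hd3, hnd3, hlast3⟩ := step_both a b pref N m (by omega) hA hB hpref
        ans curr d d last jn jn hshr hd hnd hmem hjm hBstart hlast
      exact ⟨_, _, _, _, jn, hA1, hB1, by omega, rfl, hd3, hnd3, hlast3⟩

-- ===== VERDICT (by name: the statement is the Claim_ definition above) =====
theorem returnMaxSum_spec : Claim_equal_returnMaxSum := by
  intro a b n _ hPre
  unfold Spec_returnMaxSum
  obtain ⟨hPa, hPb⟩ := hPre
  have hA : n.toNat ≤ a.length := by omega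
  have hB : n.toNat ≤ b.length := by omega
  obtain ⟨ans, curr, d, last, jn, hAf, hBf, -, -, -, -, -⟩ :=
    loop_inv a b n.toNat hA hB _ rfl n.toNat (le_refl _)
  have hrange : PySem.List.pyRange 0 n 1
      = (List.range n.toNat).map (fun (k : Nat) => (k : Int)) := by
    rw [PySem.List.pyRange_one 0 n]
    norm_num
  unfold returnMaxSum returnMaxSum_alt
  rw [hrange]
  simp only [List.foldl_map]
  rw [pref_eq b n.toNat hB, hAf, hBf]
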